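-- pv_equiv track=rewrite | github.com/thebugcreator/ul-pmb | calf/spaCy_evaluation.py | calc
-- ===== SOURCE A (Python) =====
-- def calc(s1, s2):
--     """
--     calculates the expected, correct, and provided "B" tag for eaach sentence. inputs are IOB strings, golden and estimated, respectfully.
--     """
--     e = 0
--     c = 0
--     p = 0
--     for i, ch in enumerate(s1):
--         if ch == "B" :
--             e += 1
--             if i < len(s2):
--                 if s2[i] == "B" : c += 1
--         if i < len(s2):
--             if s2[i] == "B" : p += 1
--     return e, c, p
-- ===== SOURCE B (Python) =====
-- def calc(s1, s2):
--     b1 = {i for i, ch in enumerate(s1) if ch == "B"}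
--     b2 = {i for i, ch in enumerate(s2) if i < len(s1) and ch == "B"}
--     return len(b1), len(b1 & b2), len(b2)
-- ===== Notes on version B (the rewrite author's own statement) =====
-- stated objective: alternative
-- what changed: Replaced the single interleaved counter loop by building two index SETS (positions of 'B' in s1, and positions of 'B' in s2 below len(s1)) and returning their cardinalities and the cardinality of their intersection.
import Mathlib
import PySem

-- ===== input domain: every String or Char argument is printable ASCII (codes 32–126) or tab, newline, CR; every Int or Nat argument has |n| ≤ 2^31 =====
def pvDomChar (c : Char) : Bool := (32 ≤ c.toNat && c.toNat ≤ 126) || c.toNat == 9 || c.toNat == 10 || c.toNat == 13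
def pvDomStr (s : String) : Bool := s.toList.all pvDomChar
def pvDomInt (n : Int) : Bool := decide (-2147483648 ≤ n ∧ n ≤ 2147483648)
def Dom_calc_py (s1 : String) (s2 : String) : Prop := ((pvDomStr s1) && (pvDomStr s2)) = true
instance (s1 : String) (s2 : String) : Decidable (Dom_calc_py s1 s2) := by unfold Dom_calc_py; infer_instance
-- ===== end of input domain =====

-- B replaces A's single interleaved counter loop by two index SETS of 'B' positions
-- and returns |b1|, |b1 ∩ b2|, |b2|; objective: alternative (set-based formulation).

-- ===== PORT A =====
-- one loop over enumerate(s1), state (e, c, p), guarded indexing into s2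
def calc_py (s1 : String) (s2 : String) : Int × Int × Int :=
  let l2 := s2.toList
  (PySem.List.enumerate s1.toList 0).foldl
    (fun (st : Int × Int × Int) (ic : Int × Char) =>
      let e := st.1; let c := st.2.1; let p := st.2.2
      let i := ic.1; let ch := ic.2
      let ec : Int × Int :=
        if ch == 'B' then
          (e + 1,
           if i < (l2.length : Int) then
             (if PySem.List.pyGetD l2 i ' ' == 'B' then c + 1 else c)
           else c)
        else (e, c)
      let p :=
        if i < (l2.length : Int) then
          (if PySem.List.pyGetD l2 i ' ' == 'B' then p + 1 else p)
        else p
      (ec.1, ec.2, p))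
    (0, 0, 0)

-- ===== PORT B =====
-- b1 = {i : s1[i]=='B'}, b2 = {i < len(s1) : s2[i]=='B'}; result (|b1|, |b1 & b2|, |b2|)
def calc_py_alt (s1 : String) (s2 : String) : Int × Int × Int :=
  let b1 : PySem.Set Int := PySem.Set.ofList
    (((PySem.List.enumerate s1.toList 0).filter (fun ic => ic.2 == 'B')).map Prod.fst)
  let b2 : PySem.Set Int := PySem.Set.ofList
    (((PySem.List.enumerate s2.toList 0).filter
        (fun ic => decide (ic.1 < PySem.Str.len s1) && ic.2 == 'B')).map Prod.fst)
  (PySem.Set.len b1, PySem.Set.len (PySem.Set.inter b1 b2), PySem.Set.len b2)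

-- ===== PRECONDITION & SPEC =====
def Spec_calc_py (s1 : String) (s2 : String) (out : Int × Int × Int) : Prop := out = calc_py_alt s1 s2
instance (s1 : String) (s2 : String) (out : Int × Int × Int) : Decidable (Spec_calc_py s1 s2 out) := by unfold Spec_calc_py; infer_instance

-- ===== CLAIM =====
def Claim_equal_calc_py : Prop := ∀ (s1 : String) (s2 : String), Dom_calc_py s1 s2 → Spec_calc_py s1 s2 (calc_py s1 s2)

-- ===== LEMMAS AND PROOFS =====

-- the loop of A, started at offset k, computes the three counts relative to l2.drop k
theorem calc_loop_eq (l2 : List Char) (l1 : List Char) (k : Nat) (e c p : Int) :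
    (PySem.List.enumerate l1 (k : Int)).foldl
      (fun (st : Int × Int × Int) (ic : Int × Char) =>
        let e := st.1; let c := st.2.1; let p := st.2.2
        let i := ic.1; let ch := ic.2
        let ec : Int × Int :=
          if ch == 'B' then
            (e + 1,
             if i < (l2.length : Int) then
               (if PySem.List.pyGetD l2 i ' ' == 'B' then c + 1 else c)
             else c)
          else (e, c)
        let p :=
          if i < (l2.length : Int) then
            (if PySem.List.pyGetD l2 i ' ' == 'B' then p + 1 else p)
          else p
        (ec.1, ec.2, p))
      (e, c, p)
    = (e + (l1.count 'B' : Int),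
       c + (((l1.zip (l2.drop k)).filter (fun ab => ab.1 == 'B' && ab.2 == 'B')).length : Int),
       p + (((l2.drop k).take l1.length).count 'B' : Int)) := by
  induction l1 generalizing k e c p with
  | nil => simp [PySem.List.enumerate]
  | cons x t ih =>
    rw [PySem.List.enumerate_cons]
    simp only [List.foldl_cons]
    by_cases hk : k < l2.length
    · have hget : PySem.List.pyGetD l2 (k : Int) ' ' = l2[k] := by
        simp [PySem.List.pyGetD_natCast, hk]
      have hlt : ((k : Int) < (l2.length : Int)) := by exact_mod_cast hk
      have h1 : ((k : Int) + 1) = ((k + 1 : Nat) : Int) := by push_cast; ring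
      rw [h1, ih]
      have hzlen : (((x :: t).zip (l2.drop k)).filter
            (fun ab => ab.1 == 'B' && ab.2 == 'B')).length
          = (if x == 'B' && l2[k] == 'B' then 1 else 0)
            + ((t.zip (l2.drop (k + 1))).filter
                (fun ab => ab.1 == 'B' && ab.2 == 'B')).length := by
        rw [List.drop_eq_getElem_cons hk, List.zip_cons_cons, List.filter_cons]
        split <;> simp_all <;> omega
      have hcnt : ((l2.drop k).take (x :: t).length).count 'B'
          = (if l2[k] == 'B' then 1 else 0)
            + ((l2.drop (k + 1)).take t.length).count 'B' := by
        simp only [List.length_cons]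
        rw [List.drop_eq_getElem_cons hk, List.take_succ_cons, List.count_cons]
        by_cases hy : l2[k] = 'B' <;> simp [hy] <;> omega
      simp only [hget, hlt, if_pos, hzlen, hcnt]
      by_cases hx : x = 'B' <;> by_cases hy : l2[k] = 'B' <;>
        simp [hx, hy, List.count_cons, Prod.ext_iff] <;>
        push_cast <;> omega
    · have hdrop : l2.drop k = [] := List.drop_eq_nil_of_le (by omega)
      have hdrop1 : l2.drop (k + 1) = [] := List.drop_eq_nil_of_le (by omega)
      have hlt : ¬ ((k : Int) < (l2.length : Int)) := by exact_mod_cast hk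
      have h1 : ((k : Int) + 1) = ((k + 1 : Nat) : Int) := by push_cast; ring
      rw [h1, ih]
      simp only [hdrop, hdrop1, hlt, if_neg, not_false_iff]
      by_cases hx : x = 'B' <;>
        simp [hx, List.count_cons, Prod.ext_iff] <;> push_cast <;> omega

-- B-side helper (proof only): the list of positions of 'B' in a char list, in order
def idxB : List Char → List Nat
  | [] => []
  | x :: t => (if x = 'B' then [0] else []) ++ (idxB t).map (fun j => j + 1)

theorem mem_idxB (l : List Char) (j : Nat) : j ∈ idxB l ↔ l[j]? = some 'B' := by
  induction l generalizing j with
  | nil => simp [idxB]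
  | cons x t ih =>
    cases j with
    | zero => by_cases hx : x = 'B' <;> simp [idxB, hx]
    | succ m => by_cases hx : x = 'B' <;> simp [idxB, hx, ih]

theorem length_idxB (l : List Char) : (idxB l).length = l.count 'B' := by
  induction l with
  | nil => simp [idxB]
  | cons x t ih =>
    by_cases hx : x = 'B' <;> simp [idxB, hx, List.count_cons, ih]

theorem pairwise_idxB (l : List Char) : (idxB l).Pairwise (· < ·) := by
  induction l with
  | nil => simp [idxB]
  | cons x t ih =>
    have hmap : ((idxB t).map (fun j => j + 1)).Pairwise (· < ·) :=
      List.pairwise_map.mpr (ih.imp (by omega))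
    by_cases hx : x = 'B'
    · simp only [idxB, hx, if_pos, List.singleton_append, List.pairwise_cons]
      exact ⟨by simp, hmap⟩
    · simpa [idxB, hx] using hmap

theorem nodup_idxB (l : List Char) : (idxB l).Nodup :=
  (pairwise_idxB l).imp (fun h => Nat.ne_of_lt h)

-- enumerate-comprehension = idxB, shifted by the offset
theorem enumFilter_eq_idxB (l : List Char) (k : Int) :
    ((PySem.List.enumerate l k).filter (fun ic => ic.2 == 'B')).map Prod.fst
      = (idxB l).map (fun (j : Nat) => (j : Int) + k) := by
  induction l generalizing k with
  | nil => simp [PySem.List.enumerate, idxB]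
  | cons x t ih =>
    rw [PySem.List.enumerate_cons, List.filter_cons]
    have htail : (idxB t).map ((fun (j : Nat) => (j : Int) + k) ∘ (fun j => j + 1))
        = (idxB t).map (fun (j : Nat) => (j : Int) + (k + 1)) := by
      apply List.map_congr_left
      intro j _
      simp only [Function.comp]
      push_cast
      ring
    by_cases hx : x = 'B'
    · simp only [hx, beq_self_eq_true, if_pos, List.map_cons, ih (k + 1), idxB,
        List.singleton_append, List.map_map, htail, Nat.cast_zero, zero_add]
    · have hbe : (x == 'B') = false := by simp [hx]
      simp only [hbe, Bool.false_eq_true, if_false, ih (k + 1), idxB, hx,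
        List.nil_append, List.map_map, htail]

theorem filter_map_cast (xs : List Nat) (p : Int → Bool) :
    ((xs.map (fun (j : Nat) => (j : Int))).filter p)
      = (xs.filter (fun (j : Nat) => p (j : Int))).map (fun (j : Nat) => (j : Int)) := by
  rw [List.filter_map]
  rfl

theorem mem_map_cast (xs : List Nat) (j : Nat) :
    ((j : Int) ∈ xs.map (fun (j : Nat) => (j : Int))) ↔ j ∈ xs := by
  constructor
  · intro h
    rcases List.mem_map.mp h with ⟨m, hm, he⟩
    have hmj : m = j := by exact_mod_cast he
    exact hmj ▸ hm
  · intro h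
    exact List.mem_map_of_mem h

-- length of the bounded filter = count in the prefix
theorem filter_lt_idxB (l : List Char) (m : Nat) :
    ((idxB l).filter (fun j => decide (j < m))).length = (l.take m).count 'B' := by
  induction l generalizing m with
  | nil => simp [idxB]
  | cons x t ih =>
    cases m with
    | zero =>
      have hnil : (idxB (x :: t)).filter (fun j => decide (j < 0)) = [] :=
        List.filter_eq_nil_iff.mpr (by intro a _; simp)
      simp [hnil]
    | succ m' =>
      have hpred : ((fun j => decide (j < m' + 1)) ∘ (fun (j : Nat) => j + 1))
          = (fun j => decide (j < m')) := by
        funext j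
        simp [Function.comp]
      have hcons : idxB (x :: t)
          = (if x = 'B' then [0] else []) ++ (idxB t).map (fun j => j + 1) := rfl
      rw [hcons, List.filter_append, List.filter_map, hpred]
      by_cases hx : x = 'B'
      · simp [hx, ih m', List.count_cons]
      · simp [hx, ih m', List.count_cons]

-- length of the membership filter = length of A's zip filter
theorem filter_mem_idxB (l1 l2 : List Char) :
    ((idxB l1).filter (fun j => decide (j ∈ idxB l2))).length
      = ((l1.zip l2).filter (fun ab => ab.1 == 'B' && ab.2 == 'B')).length := by
  induction l1 generalizing l2 with
  | nil => simp [idxB]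
  | cons x t ih =>
    cases l2 with
    | nil =>
      have hnil : (idxB (x :: t)).filter (fun j => decide (j ∈ idxB ([] : List Char))) = [] :=
        List.filter_eq_nil_iff.mpr (by intro a _; simp [idxB])
      simp [hnil]
    | cons y u =>
      have hpred : ((fun j => decide (j ∈ idxB (y :: u))) ∘ (fun (j : Nat) => j + 1))
          = (fun j => decide (j ∈ idxB u)) := by
        funext j
        have hs : ((j + 1) ∈ idxB (y :: u)) ↔ j ∈ idxB u := by simp [mem_idxB]
        simp [Function.comp, hs]
      have hcons : idxB (x :: t)
          = (if x = 'B' then [0] else []) ++ (idxB t).map (fun j => j + 1) := rfl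
      rw [hcons, List.filter_append, List.filter_map, hpred,
        List.length_append, List.length_map, ih u, List.zip_cons_cons, List.filter_cons]
      by_cases hx : x = 'B' <;> by_cases hy : y = 'B' <;>
        simp [hx, hy, mem_idxB] <;> omega

-- ===== VERDICT =====
theorem calc_py_spec : Claim_equal_calc_py := by
  intro s1 s2 _
  show calc_py s1 s2 = calc_py_alt s1 s2
  have h0 : ((0 : Int)) = ((0 : Nat) : Int) := rfl
  have ha : calc_py s1 s2 = ((s1.toList.count 'B' : Int),
      (((s1.toList.zip s2.toList).filter (fun ab => ab.1 == 'B' && ab.2 == 'B')).length : Int),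
      ((s2.toList.take s1.toList.length).count 'B' : Int)) := by
    unfold calc_py
    rw [h0, calc_loop_eq]
    simp
  have hb0 : ∀ l : List Char,
      ((PySem.List.enumerate l 0).filter (fun ic => ic.2 == 'B')).map Prod.fst
        = (idxB l).map (fun (j : Nat) => (j : Int)) := by
    intro l
    rw [enumFilter_eq_idxB]
    apply List.map_congr_left
    intro j _
    ring
  have hb2 : ((PySem.List.enumerate s2.toList 0).filter
        (fun ic => decide (ic.1 < PySem.Str.len s1) && ic.2 == 'B')).map Prod.fst
      = ((idxB s2.toList).filter (fun j => decide (j < s1.toList.length))).map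
          (fun (j : Nat) => (j : Int)) := by
    have hlen : PySem.Str.len s1 = (s1.toList.length : Int) := by
      simp [PySem.Str.len]
    have hsplit : ((PySem.List.enumerate s2.toList 0).filter
          (fun ic => decide (ic.1 < PySem.Str.len s1) && ic.2 == 'B'))
        = (((PySem.List.enumerate s2.toList 0).filter (fun ic => ic.2 == 'B')).filter
            (fun ic => decide (ic.1 < (s1.toList.length : Int)))) := by
      rw [List.filter_filter]
      apply List.filter_congr
      intro ic _
      rw [hlen, Bool.and_comm]
    have hmapfst : (((PySem.List.enumerate s2.toList 0).filter (fun ic => ic.2 == 'B')).filter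
          (fun ic => decide (ic.1 < (s1.toList.length : Int)))).map Prod.fst
        = (((PySem.List.enumerate s2.toList 0).filter (fun ic => ic.2 == 'B')).map
            Prod.fst).filter (fun i => decide (i < (s1.toList.length : Int))) := by
      rw [List.filter_map]
      rfl
    rw [hsplit, hmapfst, hb0 s2.toList, filter_map_cast]
    congr 1
    apply List.filter_congr
    intro j _
    simp
  have hn1 : ((idxB s1.toList).map (fun (j : Nat) => (j : Int))).Nodup :=
    (nodup_idxB s1.toList).map (fun a b h => by exact_mod_cast h)
  have hn2 : (((idxB s2.toList).filter (fun j => decide (j < s1.toList.length))).map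
      (fun (j : Nat) => (j : Int))).Nodup :=
    ((nodup_idxB s2.toList).filter _).map (fun a b h => by exact_mod_cast h)
  have halt : calc_py_alt s1 s2
      = ((s1.toList.count 'B' : Int),
         (((s1.toList.zip s2.toList).filter (fun ab => ab.1 == 'B' && ab.2 == 'B')).length : Int),
         ((s2.toList.take s1.toList.length).count 'B' : Int)) := by
    show (PySem.Set.len (PySem.Set.ofList
            (((PySem.List.enumerate s1.toList 0).filter (fun ic => ic.2 == 'B')).map Prod.fst)),
          PySem.Set.len (PySem.Set.inter
            (PySem.Set.ofList
              (((PySem.List.enumerate s1.toList 0).filter (fun ic => ic.2 == 'B')).map Prod.fst))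
            (PySem.Set.ofList
              (((PySem.List.enumerate s2.toList 0).filter
                  (fun ic => decide (ic.1 < PySem.Str.len s1) && ic.2 == 'B')).map Prod.fst))),
          PySem.Set.len (PySem.Set.ofList
            (((PySem.List.enumerate s2.toList 0).filter
                (fun ic => decide (ic.1 < PySem.Str.len s1) && ic.2 == 'B')).map Prod.fst)))
        = _
    rw [hb0 s1.toList, hb2, PySem.Set.ofList_eq_self_of_nodup _ hn1,
      PySem.Set.ofList_eq_self_of_nodup _ hn2]
    have hint : PySem.Set.inter ((idxB s1.toList).map (fun (j : Nat) => (j : Int)))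
          (((idxB s2.toList).filter (fun j => decide (j < s1.toList.length))).map
            (fun (j : Nat) => (j : Int)))
        = ((idxB s1.toList).filter (fun j => decide (j ∈ idxB s2.toList))).map
            (fun (j : Nat) => (j : Int)) := by
      show (((idxB s1.toList).map (fun (j : Nat) => (j : Int))).filter
          (fun i => (((idxB s2.toList).filter (fun j => decide (j < s1.toList.length))).map
            (fun (j : Nat) => (j : Int))).contains i)) = _
      rw [filter_map_cast]
      congr 1
      apply List.filter_congr
      intro j hj
      have hjlen : j < s1.toList.length :=
        (List.getElem?_eq_some_iff.mp ((mem_idxB s1.toList j).mp hj)).1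
      have hjlen' : j < s1.length := by simpa using hjlen
      simp [mem_map_cast, List.mem_filter, hjlen']
    rw [hint]
    simp only [Prod.mk.injEq]
    refine ⟨?_, ?_, ?_⟩
    · simp [PySem.Set.len, length_idxB]
    · simp [PySem.Set.len, filter_mem_idxB]
    · simp [PySem.Set.len, filter_lt_idxB]
  rw [ha, halt]
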